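-- pv_equiv track=rewrite | github.com/HenryScratch/rzd_bot | helpers.py | find_free_seats_sv
-- ===== SOURCE A (Python) =====
-- def find_free_seats_sv(free_seats: list):
--     total_seats=96
--     seats_per_coupe = 2
--     free_seats_set = set(free_seats)
--
--     # Списки для купе с 2 свободными местами
--     two_free_coupes = []
--     one_free_coupes = []
--
--
--     # Проверяем каждое купе
--     for coupe_num in range(total_seats // seats_per_coupe):
--         # Номера мест в текущем купе
--         start_seat = coupe_num * seats_per_coupe + 1
--         coupe_seats = {start_seat + i for i in range(seats_per_coupe)}
--
--         # Находим пересечение свободных мест с местами в купе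
--         free_in_coupe = coupe_seats.intersection(free_seats_set)
--         free_count = len(free_in_coupe)
--
--         # Определяем тип купе по количеству свободных мест
--         if free_count == 2:
--             two_free_coupes.append(coupe_num + 1)
--         elif free_count == 1:
--             one_free_coupes.append(coupe_num + 1)
--
--     # Возвращаем списки купе по количеству свободных мест
--     return {'2': len(two_free_coupes), '1': len(one_free_coupes)}
-- ===== SOURCE B (Python) =====
-- def find_free_seats_sv(free_seats: list):
--     # Group the free seats themselves into coupes instead of scanning all 48 coupes:
--     # histogram of coupe index (s-1)//2 over the deduplicated, in-range seats.
--     counts = {}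
--     for s in set(free_seats):
--         if 1 <= s <= 96:
--             k = (s - 1) // 2
--             counts[k] = counts.get(k, 0) + 1
--     return {'2': sum(1 for v in counts.values() if v == 2),
--             '1': sum(1 for v in counts.values() if v == 1)}
-- ===== Notes on version B (the rewrite author's own statement) =====
-- stated objective: idiomatic
-- what changed: Instead of scanning all 48 coupes and intersecting each coupe's seat set with the free set, B builds one histogram mapping each deduplicated in-range free seat to its coupe index (s-1)//2 and counts histogram values equal to 2 and 1.
import Mathlib
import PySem

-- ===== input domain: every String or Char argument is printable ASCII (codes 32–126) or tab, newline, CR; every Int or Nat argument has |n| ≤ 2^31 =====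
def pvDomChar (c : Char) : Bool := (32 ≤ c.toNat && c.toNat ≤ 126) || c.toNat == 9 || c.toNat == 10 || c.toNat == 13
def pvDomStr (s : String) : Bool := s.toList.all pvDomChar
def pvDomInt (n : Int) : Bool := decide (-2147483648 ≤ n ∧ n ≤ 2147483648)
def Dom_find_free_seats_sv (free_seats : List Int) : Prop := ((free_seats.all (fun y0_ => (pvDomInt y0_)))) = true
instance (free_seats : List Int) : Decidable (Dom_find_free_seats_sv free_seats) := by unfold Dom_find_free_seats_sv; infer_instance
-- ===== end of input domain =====

-- B replaces A's scan of all 48 coupes (building and intersecting a 2-element seat set per coupe)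
-- by a single histogram over the deduplicated in-range free seats keyed by coupe index (s-1)//2.

-- ===== PORT A =====
def find_free_seats_sv (free_seats : List Int) : List (String × Int) :=
  let total_seats : Int := 96
  let seats_per_coupe : Int := 2
  let free_seats_set : PySem.Set Int := PySem.Set.ofList free_seats
  let res :=
    (PySem.List.pyRange 0 (PySem.Int.floordiv total_seats seats_per_coupe) 1).foldl
      (fun (acc : List Int × List Int) coupe_num =>
        let start_seat := coupe_num * seats_per_coupe + 1
        let coupe_seats : PySem.Set Int :=
          PySem.Set.ofList ((PySem.List.pyRange 0 seats_per_coupe 1).map (fun i => start_seat + i))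
        let free_in_coupe := PySem.Set.inter coupe_seats free_seats_set
        let free_count : Int := (free_in_coupe.length : Int)
        if free_count == 2 then (acc.1 ++ [coupe_num + 1], acc.2)
        else if free_count == 1 then (acc.1, acc.2 ++ [coupe_num + 1])
        else acc)
      (([], []) : List Int × List Int)
  [("2", (res.1.length : Int)), ("1", (res.2.length : Int))]

-- ===== PORT B =====
def find_free_seats_sv_alt (free_seats : List Int) : List (String × Int) :=
  let counts : PySem.Dict Int Int :=
    (PySem.Set.ofList free_seats).foldl
      (fun d s =>
        if 1 ≤ s ∧ s ≤ 96 then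
          let k := PySem.Int.floordiv (s - 1) 2
          d.insert k (d.getD k 0 + 1)
        else d)
      PySem.Dict.empty
  [("2", (counts.values.countP (fun v => v == 2) : Int)),
   ("1", (counts.values.countP (fun v => v == 1) : Int))]

-- ===== PRECONDITION & SPEC =====
def Spec_find_free_seats_sv (free_seats : List Int) (out : List (String × Int)) : Prop := out = find_free_seats_sv_alt free_seats
instance (free_seats : List Int) (out : List (String × Int)) : Decidable (Spec_find_free_seats_sv free_seats out) := by unfold Spec_find_free_seats_sv; infer_instance

-- ===== CLAIM (what is proved, stated in full; the proofs are below) =====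
def Claim_equal_find_free_seats_sv : Prop := ∀ (free_seats : List Int), Dom_find_free_seats_sv free_seats → Spec_find_free_seats_sv free_seats (find_free_seats_sv free_seats)

-- ===== LEMMAS AND PROOFS =====

-- number of free seats (of the deduplicated set S) lying in coupe k (seats 2k+1, 2k+2)
def pvCnt (S : List Int) (k : Int) : Int :=
  (if 2*k+1 ∈ S then 1 else 0) + (if 2*k+2 ∈ S then 1 else 0)

-- the coupe indices of the valid deduplicated free seats (B's histogram input, with multiplicity)
def pvYs (fs : List Int) : List Int :=
  ((PySem.Set.ofList fs).filter (fun s => decide (1 ≤ s ∧ s ≤ 96))).map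
    (fun s => PySem.Int.floordiv (s - 1) 2)

-- A's loop: the two appended lists are the filtered, shifted coupe indices
theorem pvLoopA (c : Int → Int) (l : List Int) (t o : List Int) :
    l.foldl (fun acc k => if c k == 2 then (acc.1 ++ [k+1], acc.2)
             else if c k == 1 then (acc.1, acc.2 ++ [k+1]) else acc) (t, o)
     = (t ++ ((l.filter (fun k => c k == 2)).map (· + 1)),
        o ++ ((l.filter (fun k => c k == 1)).map (· + 1))) := by
  induction l generalizing t o with
  | nil => simp
  | cons x xs ih =>
    rw [List.foldl_cons]
    show List.foldl _ (if c x == 2 then (t ++ [x+1], o)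
        else if c x == 1 then (t, o ++ [x+1]) else (t, o)) xs = _
    by_cases h2 : c x = 2
    · rw [if_pos (by simp [h2]), ih]
      simp [h2]
    · rw [if_neg (by simp [h2])]
      by_cases h1 : c x = 1
      · rw [if_pos (by simp [h1]), ih]
        simp [h1]
      · rw [if_neg (by simp [h1]), ih]
        simp [h1, h2]

-- A's per-coupe intersection size is pvCnt
theorem pvCoupe (S : List Int) (k : Int) :
    ((PySem.Set.inter (PySem.Set.ofList ((PySem.List.pyRange 0 2 1).map (fun i => k*2+1+i))) S).length : Int)
      = pvCnt S k := by
  have hr : PySem.List.pyRange 0 2 1 = [0, 1] := by decide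
  rw [hr]
  have hne : k*2+1+0 ≠ k*2+1+1 := by omega
  have hof : PySem.Set.ofList [k*2+1+0, k*2+1+1] = [k*2+1+0, k*2+1+1] := by
    apply PySem.Set.ofList_eq_self_of_nodup
    exact List.nodup_cons.mpr ⟨by simpa using hne, List.nodup_singleton _⟩
  simp only [List.map_cons, List.map_nil, hof]
  simp only [PySem.Set.inter, pvCnt]
  by_cases ha : (2*k+1) ∈ S <;> by_cases hb : (2*k+2) ∈ S <;>
    simp [List.filter, ha, hb, show k*2+1+0 = 2*k+1 by ring, show k*2+1+1 = 2*k+2 by ring]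

theorem pvA_eq (fs : List Int) :
    find_free_seats_sv fs =
      [("2", ((PySem.List.pyRange 0 48 1).countP (fun k => pvCnt (PySem.Set.ofList fs) k == 2) : Int)),
       ("1", ((PySem.List.pyRange 0 48 1).countP (fun k => pvCnt (PySem.Set.ofList fs) k == 1) : Int))] := by
  simp only [find_free_seats_sv]
  rw [show PySem.Int.floordiv 96 2 = 48 from by decide]
  rw [pvLoopA (fun k => ((PySem.Set.inter
        (PySem.Set.ofList ((PySem.List.pyRange 0 2 1).map (fun i => k*2+1+i)))
        (PySem.Set.ofList fs)).length : Int))]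
  simp only [pvCoupe, List.nil_append, List.length_map, ← List.countP_eq_length_filter]

theorem pvB_eq (fs : List Int) :
    find_free_seats_sv_alt fs =
      [("2", ((PySem.Set.ofList (pvYs fs)).countP (fun k => ((pvYs fs).count k : Int) == 2) : Int)),
       ("1", ((PySem.Set.ofList (pvYs fs)).countP (fun k => ((pvYs fs).count k : Int) == 1) : Int))] := by
  simp only [find_free_seats_sv_alt, pvYs]
  rw [PySem.List.foldl_ite_eq_foldl_filter]
  rw [← List.foldl_map (f := fun s => PySem.Int.floordiv (s - 1) 2)
      (g := fun (d : PySem.Dict Int Int) k => d.insert k (d.getD k 0 + 1))]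
  rw [PySem.Dict.foldl_insert_getD_add_one_eq_counter]
  simp only [PySem.Dict.values, PySem.Dict.items_counter, List.map_map, List.countP_map]
  rfl

-- pointwise: being a valid seat of coupe k (0 ≤ k < 48) means being seat 2k+1 or 2k+2
theorem pvPt (k : Int) (hk0 : 0 ≤ k) (hk1 : k < 48) (s : Int) :
    ((PySem.Int.floordiv (s-1) 2 == k) && decide (1 ≤ s ∧ s ≤ 96))
      = (s == 2*k+1 || s == 2*k+2) := by
  rw [Bool.eq_iff_iff]
  simp only [Bool.and_eq_true, beq_iff_eq, Bool.or_eq_true, decide_eq_true_eq]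
  rw [PySem.Int.floordiv_eq_iff_of_pos (by decide)]
  omega

theorem pvCountOr (a b : Int) (hab : a ≠ b) (l : List Int) :
    l.countP (fun s => s == a || s == b) = l.count a + l.count b := by
  induction l with
  | nil => simp
  | cons x xs ih =>
    by_cases hxa : x = a
    · simp [List.count_cons, hxa, hab, Ne.symm hab, ih]; omega
    · by_cases hxb : x = b
      · simp [List.count_cons, hxa, hxb, hab, Ne.symm hab, ih]; omega
      · simp [List.count_cons, hxa, hxb, ih]

-- the histogram value at coupe k equals the number of free seats in coupe k
theorem pvCountKey (fs : List Int) (k : Int) (hk0 : 0 ≤ k) (hk1 : k < 48) :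
    (((pvYs fs).count k : Int)) = pvCnt (PySem.Set.ofList fs) k := by
  have hnd : (PySem.Set.ofList fs).Nodup := PySem.Set.nodup_ofList fs
  rw [pvYs]
  rw [show ∀ (l : List Int) (a : Int), l.count a = l.countP (· == a) from fun l a => rfl]
  rw [List.countP_map, List.countP_filter]
  simp only [Function.comp_apply]
  rw [List.countP_congr (fun s _ => by rw [pvPt k hk0 hk1 s])]
  rw [pvCountOr _ _ (by omega)]
  have h1 : (PySem.Set.ofList fs).count (2*k+1) = if 2*k+1 ∈ PySem.Set.ofList fs then 1 else 0 := by
    by_cases h : 2*k+1 ∈ PySem.Set.ofList fs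
    · rw [if_pos h]; exact List.count_eq_one_of_mem hnd h
    · rw [if_neg h]; exact List.count_eq_zero_of_not_mem h
  have h2 : (PySem.Set.ofList fs).count (2*k+2) = if 2*k+2 ∈ PySem.Set.ofList fs then 1 else 0 := by
    by_cases h : 2*k+2 ∈ PySem.Set.ofList fs
    · rw [if_pos h]; exact List.count_eq_one_of_mem hnd h
    · rw [if_neg h]; exact List.count_eq_zero_of_not_mem h
  rw [h1, h2, pvCnt]
  by_cases ha : 2*k+1 ∈ PySem.Set.ofList fs <;> by_cases hb : 2*k+2 ∈ PySem.Set.ofList fs <;>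
    simp [ha, hb]

theorem pvCountPerm (u v : List Int) (hu : u.Nodup) (hv : v.Nodup) (p : Int → Bool)
    (h : ∀ x, p x = true → (x ∈ u ↔ x ∈ v)) : u.countP p = v.countP p := by
  rw [List.countP_eq_length_filter, List.countP_eq_length_filter]
  apply List.Perm.length_eq
  rw [List.perm_ext_iff_of_nodup (hu.filter _) (hv.filter _)]
  intro a
  simp only [List.mem_filter]
  constructor
  · rintro ⟨ha, hp⟩; exact ⟨(h a hp).mp ha, hp⟩
  · rintro ⟨ha, hp⟩; exact ⟨(h a hp).mpr ha, hp⟩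

theorem pvMemRange (fs : List Int) (k : Int) (hk : k ∈ pvYs fs) : 0 ≤ k ∧ k < 48 := by
  simp only [pvYs, List.mem_map, List.mem_filter, decide_eq_true_eq] at hk
  obtain ⟨s, ⟨_, hv⟩, hks⟩ := hk
  have := PySem.Int.floordiv_eq_iff_of_pos (a := s - 1) (b := 2) (q := k) (by decide)
  rw [this] at hks
  omega

theorem pvMemYs (fs : List Int) (k : Int) (hk0 : 0 ≤ k) (hk1 : k < 48)
    (hc : pvCnt (PySem.Set.ofList fs) k ≠ 0) : k ∈ pvYs fs := by
  have hmem : 2*k+1 ∈ PySem.Set.ofList fs ∨ 2*k+2 ∈ PySem.Set.ofList fs := by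
    by_cases ha : 2*k+1 ∈ PySem.Set.ofList fs
    · exact Or.inl ha
    · by_cases hb : 2*k+2 ∈ PySem.Set.ofList fs
      · exact Or.inr hb
      · exfalso; apply hc; simp [pvCnt, ha, hb]
  simp only [pvYs, List.mem_map, List.mem_filter, decide_eq_true_eq]
  rcases hmem with h | h
  · exact ⟨2*k+1, ⟨h, by omega⟩, by rw [PySem.Int.floordiv_eq_iff_of_pos (by decide)]; omega⟩
  · exact ⟨2*k+2, ⟨h, by omega⟩, by rw [PySem.Int.floordiv_eq_iff_of_pos (by decide)]; omega⟩

-- counting coupes over range(48) equals counting them over the histogram's key set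
theorem pvBridge (fs : List Int) (c : Int) (hc : c = 1 ∨ c = 2) :
    ((PySem.List.pyRange 0 48 1).countP (fun k => pvCnt (PySem.Set.ofList fs) k == c) : Int)
      = ((PySem.Set.ofList (pvYs fs)).countP (fun k => ((pvYs fs).count k : Int) == c) : Int) := by
  have h1 : (PySem.Set.ofList (pvYs fs)).countP (fun k => ((pvYs fs).count k : Int) == c)
      = (PySem.Set.ofList (pvYs fs)).countP (fun k => pvCnt (PySem.Set.ofList fs) k == c) := by
    apply List.countP_congr
    intro k hk
    have hr := pvMemRange fs k (by
      exact (PySem.Set.mem_ofList _ _).mp hk)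
    rw [pvCountKey fs k hr.1 hr.2]
  rw [h1]
  have hperm := pvCountPerm (PySem.List.pyRange 0 48 1) (PySem.Set.ofList (pvYs fs))
    (PySem.List.nodup_pyRange_one 0 48) (PySem.Set.nodup_ofList _)
    (fun k => pvCnt (PySem.Set.ofList fs) k == c) ?_
  · exact_mod_cast hperm
  intro k hp
  simp only [beq_iff_eq] at hp
  constructor
  · intro hkr
    have hb := PySem.List.mem_pyRange_one.mp hkr
    exact (PySem.Set.mem_ofList _ _).mpr (pvMemYs fs k hb.1 hb.2 (by omega))
  · intro hks
    have hr := pvMemRange fs k ((PySem.Set.mem_ofList _ _).mp hks)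
    exact PySem.List.mem_pyRange_one.mpr ⟨hr.1, hr.2⟩

-- ===== VERDICT (by name: the statement is the Claim_ definition above) =====
theorem find_free_seats_sv_spec : Claim_equal_find_free_seats_sv := by
  intro fs _
  unfold Spec_find_free_seats_sv
  rw [pvA_eq, pvB_eq, pvBridge fs 2 (Or.inr rfl), pvBridge fs 1 (Or.inl rfl)]
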